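-- pv_equiv track=rewrite | github.com/looopTools/Markdown2MbPython | Markdown2MB.py | replaceCode
-- ===== SOURCE A (Python) =====
-- def replaceCode(text):
--
--     codeStarted = False
--     lines = text.splitlines()
--
--     for x in range(0, len(lines)):
--         if lines[x].startswith('   '):
--             if not codeStarted:
--                 lines[x] = lines[x].replace(lines[x], '[code]\n' + lines[x])
--                 codeStarted = True
--         elif not lines[x].startswith('   ') and codeStarted:
--             lines[x] = lines[x].replace(lines[x], '[/code]\n' + lines[x])
--             codeStarted = False
--
--     if codeStarted:
--         return '\n'.join(lines) + '\n[/code]'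
--     else:
--         return '\n'.join(lines)
-- ===== SOURCE B (Python) =====
-- from itertools import groupby
--
--
-- def replaceCode(text):
--     out = []
--     last_indented = False
--     for indented, group in groupby(text.splitlines(), key=lambda l: l.startswith('   ')):
--         if indented:
--             out.append('[code]')
--         elif last_indented:
--             out.append('[/code]')
--         out.extend(group)
--         last_indented = indented
--     if last_indented:
--         out.append('[/code]')
--     return '\n'.join(out)
-- ===== Notes on version B (the rewrite author's own statement) =====
-- stated objective: alternative
-- what changed: B splits the lines into consecutive indented/non-indented runs with itertools.groupby and emits [code]/[/code] markers as separate output elements per run, instead of A's index loop that mutates the lines list in place under a codeStarted flag (and A's no-op self-replace call).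
import Mathlib
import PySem

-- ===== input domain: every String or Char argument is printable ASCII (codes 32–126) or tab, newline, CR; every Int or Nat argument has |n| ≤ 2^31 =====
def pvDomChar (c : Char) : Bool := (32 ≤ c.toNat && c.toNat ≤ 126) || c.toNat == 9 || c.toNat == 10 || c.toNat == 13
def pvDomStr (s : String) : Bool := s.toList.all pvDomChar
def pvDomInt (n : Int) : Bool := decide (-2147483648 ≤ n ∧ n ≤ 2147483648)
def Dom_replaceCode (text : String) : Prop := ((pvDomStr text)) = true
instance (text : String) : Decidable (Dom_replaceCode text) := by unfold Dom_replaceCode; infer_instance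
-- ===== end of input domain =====

-- B groups the lines into consecutive indented/non-indented runs first (itertools.groupby)
-- and then emits [code]/[/code] markers per run, instead of A's in-place mutation under a flag.


-- ===== PORT A =====
-- one iteration of A's `for x in range(0, len(lines))` loop; state = (lines, codeStarted)
def replaceCodeStep (st : List String × Bool) (x : Int) : List String × Bool :=
  let l := PySem.List.pyGetD st.1 x ""   -- lines[x]; x ranges over 0..len-1, always in range
  if PySem.Str.startswith l "   " then
    if !st.2 then (st.1.set x.toNat (PySem.Str.replace l l ("[code]\n" ++ l)), true)
    else st
  else if !(PySem.Str.startswith l "   ") && st.2 then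
    (st.1.set x.toNat (PySem.Str.replace l l ("[/code]\n" ++ l)), false)
  else st

def replaceCode (text : String) : String :=
  let lines := PySem.Str.splitlines text
  let st := (PySem.List.pyRange 0 (lines.length : Int) 1).foldl replaceCodeStep (lines, false)
  if st.2 then PySem.Str.join "\n" st.1 ++ "\n[/code]" else PySem.Str.join "\n" st.1

-- ===== PORT B =====
-- the groupby key: line.startswith('   ')
def pvKey (l : String) : Bool := PySem.Str.startswith l "   "

-- itertools.groupby(lines, key=pvKey): consecutive runs of lines with equal key
def pvRuns : List String → List (Bool × List String)
  | [] => []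
  | l :: t =>
    match pvRuns t with
    | (k, g) :: rest =>
        if pvKey l == k then (k, l :: g) :: rest
        else (pvKey l, [l]) :: (k, g) :: rest
    | [] => [(pvKey l, [l])]

-- one iteration of B's loop over the groups; state = (out, last_indented)
def pvEmitStep (st : List String × Bool) (r : Bool × List String) : List String × Bool :=
  ((if r.1 then st.1 ++ ["[code]"]
    else if st.2 then st.1 ++ ["[/code]"]
    else st.1) ++ r.2, r.1)

def replaceCode_alt (text : String) : String :=
  let st := (pvRuns (PySem.Str.splitlines text)).foldl pvEmitStep ([], false)
  PySem.Str.join "\n" (if st.2 then st.1 ++ ["[/code]"] else st.1)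

-- ===== PRECONDITION & SPEC =====
def Spec_replaceCode (text : String) (out : String) : Prop := out = replaceCode_alt text
instance (text : String) (out : String) : Decidable (Spec_replaceCode text out) := by unfold Spec_replaceCode; infer_instance

-- ===== CLAIM (what is proved, stated in full; the proofs are below) =====
def Claim_equal_replaceCode : Prop := ∀ (text : String), Dom_replaceCode text → Spec_replaceCode text (replaceCode text)

-- ===== LEMMAS AND PROOFS =====

-- A's per-line transformation, written as structural recursion (the flag after a line is pvKey of that line)
def pvSA : List String → Bool → List String
  | [], _ => []
  | l :: t, b =>
    if pvKey l then
      (if b then l :: pvSA t true else ("[code]\n" ++ l) :: pvSA t true)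
    else if b then ("[/code]\n" ++ l) :: pvSA t false
    else l :: pvSA t false

def pvFlag : List String → Bool → Bool
  | [], b => b
  | l :: t, _ => pvFlag t (pvKey l)

-- B's output lines, written as structural recursion over the lines (markers are separate elements)
def pvSB : List String → Bool → List String
  | [], b => if b then ["[/code]"] else []
  | l :: t, b =>
    if pvKey l then
      (if b then l :: pvSB t true else "[code]" :: l :: pvSB t true)
    else if b then "[/code]" :: l :: pvSB t false
    else l :: pvSB t false

-- B's emission, written as structural recursion over the runs
def pvE : List (Bool × List String) → Bool → List String
  | [], b => if b then ["[/code]"] else []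
  | (k, g) :: rest, b =>
    (if k then ["[code]"] else if b then ["[/code]"] else []) ++ g ++ pvE rest k

def pvHeadKey : List (Bool × List String) → Bool → Bool
  | [], d => d
  | (k, _) :: _, _ => k

-- well-formedness of a groupby result: runs nonempty, uniform key, adjacent keys alternate
def pvGood : List (Bool × List String) → Prop
  | [] => True
  | (k, g) :: rest => g ≠ [] ∧ (∀ l ∈ g, pvKey l = k) ∧ pvHeadKey rest (!k) = !k ∧ pvGood rest

-- each output line preceded by '\n' (join-with-separator as a flat list of chars)
def pvCJoin (xs : List String) : List Char := (xs.map (fun s => '\n' :: s.toList)).flatten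

theorem pvCJoin_nil : pvCJoin [] = [] := rfl

theorem pvCJoin_cons (x : String) (xs : List String) :
    pvCJoin (x :: xs) = '\n' :: x.toList ++ pvCJoin xs := rfl

theorem pv_go (c : Char) (t new : List Char) :
    PySem.Chars.replace.go (c :: t) new (c :: t).length (c :: t) [] = new := by
  rw [PySem.Chars.replace.go.eq_def]
  simp only [List.length_cons, List.isPrefixOf_iff_prefix, List.prefix_refl, if_true,
    List.drop_succ_cons, List.drop_length, List.append_nil]
  rw [PySem.Chars.replace.go.eq_def]
  cases t.length <;> simp

theorem pv_replace_self (l v : String) : PySem.Str.replace l l v = v := by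
  simp only [PySem.Str.replace, PySem.Chars.replace]
  by_cases h : l = ""
  · subst h; simp
  · have hl : l.toList ≠ [] := by
      intro hnil
      exact h (String.toList_inj.mp (by simp [hnil]))
    rw [if_neg (by simpa [List.isEmpty_iff] using hl)]
    obtain ⟨c, t, hct⟩ := List.exists_cons_of_ne_nil hl
    rw [hct, pv_go]
    simp

theorem pv_foldA : ∀ (t done : List String) (b : Bool),
    (PySem.List.pyRange (done.length : Int) ((done.length : Int) + (t.length : Int)) 1).foldl
      replaceCodeStep (done ++ t, b)
      = (done ++ pvSA t b, pvFlag t b) := by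
  intro t
  induction t with
  | nil =>
    intro done b
    rw [PySem.List.pyRange_one_eq_nil (by simp)]
    simp [pvSA, pvFlag]
  | cons l t ih =>
    intro done b
    rw [PySem.List.pyRange_one_cons (by simp only [List.length_cons]; push_cast; omega)]
    simp only [List.foldl_cons]
    have hget : PySem.List.pyGetD (done ++ l :: t) (done.length : Int) "" = l := by
      rw [PySem.List.pyGetD_natCast]
      simp [List.getD_eq_getElem?_getD]
    have hset : ∀ v : String, (done ++ l :: t).set ((done.length : Int)).toNat v = done ++ v :: t := by
      intro v; simp
    have hstep : replaceCodeStep (done ++ l :: t, b) (done.length : Int)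
        = (done ++ (if pvKey l then (if b then l else "[code]\n" ++ l)
                    else if b then "[/code]\n" ++ l else l) :: t, pvKey l) := by
      unfold replaceCodeStep
      simp only [hget]
      cases hk : pvKey l <;> cases b <;>
        simp [pvKey] at hk ⊢ <;>
        simp [hk, hset, pv_replace_self]
    rw [hstep]
    have hcast1 : ((done.length : Int) + 1) = (((done ++ [(if pvKey l then (if b then l else "[code]\n" ++ l)
                    else if b then "[/code]\n" ++ l else l)]).length : Int)) := by
      simp
    have hcast2 : ((done.length : Int) + ((l :: t).length : Int))
        = (((done ++ [(if pvKey l then (if b then l else "[code]\n" ++ l)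
                    else if b then "[/code]\n" ++ l else l)]).length : Int) + (t.length : Int)) := by
      simp; push_cast; ring
    have hassoc : done ++ (if pvKey l then (if b then l else "[code]\n" ++ l)
                    else if b then "[/code]\n" ++ l else l) :: t
        = (done ++ [(if pvKey l then (if b then l else "[code]\n" ++ l)
                    else if b then "[/code]\n" ++ l else l)]) ++ t := by
      simp
    rw [hcast1, hcast2, hassoc, ih]
    cases hk : pvKey l <;> cases b <;> simp [pvSA, pvFlag, hk]

theorem pv_foldE : ∀ (runs : List (Bool × List String)) (acc : List String) (b : Bool),
    (if ((runs.foldl pvEmitStep (acc, b)).2) then (runs.foldl pvEmitStep (acc, b)).1 ++ ["[/code]"]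
     else (runs.foldl pvEmitStep (acc, b)).1) = acc ++ pvE runs b := by
  intro runs
  induction runs with
  | nil => intro acc b; cases b <;> simp [pvE]
  | cons r rest ih =>
    intro acc b
    obtain ⟨k, g⟩ := r
    simp only [List.foldl_cons, pvEmitStep]
    rw [ih]
    cases k <;> cases b <;> simp [pvE]

theorem pv_runs_flat : ∀ (t : List String), ((pvRuns t).map (·.2)).flatten = t := by
  intro t
  induction t with
  | nil => rfl
  | cons l t ih =>
    unfold pvRuns
    cases h : pvRuns t with
    | nil =>
      rw [h] at ih
      simp at ih
      simp [← ih]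
    | cons p rest =>
      obtain ⟨k, g⟩ := p
      rw [h] at ih
      by_cases hk : pvKey l == k <;> simp [hk] <;> simp at ih <;> simp [ih]

theorem pv_runs_good : ∀ (t : List String), pvGood (pvRuns t) := by
  intro t
  induction t with
  | nil => trivial
  | cons l t ih =>
    cases h : pvRuns t with
    | nil =>
      have hr : pvRuns (l :: t) = [(pvKey l, [l])] := by simp [pvRuns, h]
      rw [hr]
      exact ⟨by simp, by simp, rfl, trivial⟩
    | cons p rest =>
      obtain ⟨k, g⟩ := p
      rw [h] at ih
      obtain ⟨hg, hu, hh, hrest⟩ := ih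
      by_cases hk : pvKey l = k
      · have hr : pvRuns (l :: t) = (k, l :: g) :: rest := by simp [pvRuns, h, hk]
        rw [hr]
        exact ⟨by simp, by
          intro x hx
          rcases List.mem_cons.mp hx with hx | hx
          · subst hx; exact hk
          · exact hu x hx, hh, hrest⟩
      · have hr : pvRuns (l :: t) = (pvKey l, [l]) :: (k, g) :: rest := by simp [pvRuns, h, hk]
        rw [hr]
        refine ⟨by simp, by simp, ?_, hg, hu, hh, hrest⟩
        show k = !(pvKey l)
        cases hkl : pvKey l <;> cases hkk : k <;> simp_all

theorem pv_SB_run0 : ∀ (g rest : List String) (k : Bool),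
    (∀ l ∈ g, pvKey l = k) → pvSB (g ++ rest) k = g ++ pvSB rest k := by
  intro g
  induction g with
  | nil => intro rest k _; rfl
  | cons x g ih =>
    intro rest k hu
    have hx : pvKey x = k := hu x (by simp)
    have ih' := ih rest k (fun l hl => hu l (by simp [hl]))
    cases k <;> simp [pvSB, hx, ih']

theorem pv_SB_run : ∀ (g : List String) (k : Bool) (rest : List String) (b : Bool),
    g ≠ [] → (∀ l ∈ g, pvKey l = k) →
    pvSB (g ++ rest) b
      = (if k then (if b then [] else ["[code]"]) else if b then ["[/code]"] else []) ++ g ++ pvSB rest k := by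
  intro g k rest b hg hu
  cases g with
  | nil => exact absurd rfl hg
  | cons x g =>
    have hx : pvKey x = k := hu x (by simp)
    have h0 := pv_SB_run0 g rest k (fun l hl => hu l (by simp [hl]))
    cases k <;> cases b <;> simp [pvSB, hx, h0]

theorem pv_E_eq_SB : ∀ (runs : List (Bool × List String)) (b : Bool),
    pvGood runs → (b = true → pvHeadKey runs false = false) →
    pvE runs b = pvSB (((runs.map (·.2)).flatten)) b := by
  intro runs
  induction runs with
  | nil => intro b _ _; rfl
  | cons r rest ih =>
    intro b hgood hb
    obtain ⟨k, g⟩ := r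
    obtain ⟨hg, hu, hh, hrest⟩ := hgood
    have hb' : k = true → pvHeadKey rest false = false := by
      intro hk
      cases rest with
      | nil => rfl
      | cons r' rest' =>
        obtain ⟨k', g'⟩ := r'
        simp only [pvHeadKey] at hh ⊢
        rw [hh, hk]
        rfl
    have ihr := ih k hrest hb'
    simp only [List.map_cons, List.flatten_cons]
    rw [pv_SB_run g k _ b hg hu, ← ihr]
    cases k <;> cases b <;> simp [pvE]
    · exact absurd (hb rfl) (by simp [pvHeadKey])

theorem pv_joinc : ∀ (t : List String) (h : String),
    (PySem.Str.join "\n" (h :: t)).toList = h.toList ++ pvCJoin t := by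
  intro t
  induction t with
  | nil =>
    intro h
    rw [PySem.Str.toList_join]
    simp [PySem.Chars.join_singleton, pvCJoin_nil]
  | cons x t ih =>
    intro h
    rw [PySem.Str.toList_join]
    simp only [List.map_cons]
    rw [PySem.Chars.join_cons_cons]
    have := ih x
    rw [PySem.Str.toList_join] at this
    simp only [List.map_cons] at this
    rw [this, pvCJoin_cons]
    simp

theorem pv_J : ∀ (lines : List String) (b : Bool),
    pvCJoin (pvSB lines b) = pvCJoin (pvSA lines b) ++ (if pvFlag lines b then "\n[/code]".toList else []) := by
  intro lines
  induction lines with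
  | nil =>
    intro b
    cases b <;> simp [pvSB, pvSA, pvFlag, pvCJoin_nil, pvCJoin_cons]
  | cons l t ih =>
    intro b
    unfold pvSA pvSB pvFlag
    have h1 : ("[code]\n" ++ l).toList = "[code]".toList ++ '\n' :: l.toList := by
      simp [show ("[code]\n" : String).toList = "[code]".toList ++ ['\n'] by decide]
    have h2 : ("[/code]\n" ++ l).toList = "[/code]".toList ++ '\n' :: l.toList := by
      simp [show ("[/code]\n" : String).toList = "[/code]".toList ++ ['\n'] by decide]
    cases hk : pvKey l <;> cases b <;>
      simp [pvCJoin_cons, ih, h1, h2]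

theorem pv_main : ∀ (lines : List String),
    (if pvFlag lines false then PySem.Str.join "\n" (pvSA lines false) ++ "\n[/code]"
     else PySem.Str.join "\n" (pvSA lines false))
      = PySem.Str.join "\n" (pvSB lines false) := by
  intro lines
  cases lines with
  | nil => simp [pvFlag, pvSA, pvSB]
  | cons l t =>
    apply String.toList_inj.mp
    have htail : (if pvFlag (l :: t) false then PySem.Str.join "\n" (pvSA (l :: t) false) ++ "\n[/code]"
        else PySem.Str.join "\n" (pvSA (l :: t) false)).toList
        = (PySem.Str.join "\n" (pvSA (l :: t) false)).toList
          ++ (if pvFlag (l :: t) false then "\n[/code]".toList else []) := by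
      cases h : pvFlag (l :: t) false <;> simp
    rw [htail]
    have hJ := pv_J t
    have h1 : ("[code]\n" ++ l).toList = "[code]".toList ++ '\n' :: l.toList := by
      simp [show ("[code]\n" : String).toList = "[code]".toList ++ ['\n'] by decide]
    cases hk : pvKey l
    · have hSA : pvSA (l :: t) false = l :: pvSA t false := by simp [pvSA, hk]
      have hSB : pvSB (l :: t) false = l :: pvSB t false := by simp [pvSB, hk]
      have hF : pvFlag (l :: t) false = pvFlag t false := by simp [pvFlag, hk]
      rw [hSA, hSB, hF, pv_joinc, pv_joinc, hJ false]
      simp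
    · have hSA : pvSA (l :: t) false = ("[code]\n" ++ l) :: pvSA t true := by simp [pvSA, hk]
      have hSB : pvSB (l :: t) false = "[code]" :: l :: pvSB t true := by simp [pvSB, hk]
      have hF : pvFlag (l :: t) false = pvFlag t true := by simp [pvFlag, hk]
      rw [hSA, hSB, hF, pv_joinc, pv_joinc, pvCJoin_cons, hJ true, h1]
      simp

-- ===== VERDICT (by name: the statement is the Claim_ definition above) =====
theorem replaceCode_spec : Claim_equal_replaceCode := by
  intro text _
  unfold Spec_replaceCode replaceCode replaceCode_alt
  have hA := pv_foldA (PySem.Str.splitlines text) [] false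
  simp only [List.nil_append, List.length_nil, Int.natCast_zero, zero_add] at hA
  have hE := pv_foldE (pvRuns (PySem.Str.splitlines text)) [] false
  simp only [List.nil_append] at hE
  simp only [hA, hE, pv_E_eq_SB _ false (pv_runs_good _) (by simp), pv_runs_flat]
  exact pv_main _
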